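-- pv_equiv track=rewrite | github.com/linusschulte/ionshuttler | src/mqt/ionshuttler/multi_shuttler/outside/fgp_roee.py | _aggregate_time_slices
-- ===== SOURCE A (Python) =====
-- def _aggregate_time_slices(
--     time_slices: list[list[int]],
--     aggregate_slices: int
-- ) -> list[list[int]]:
--     """Aggregate time slices by combining adjacent slices."""
--     if aggregate_slices <= 1:
--         return time_slices
--
--     aggregated: list[list[int]] = []
--     current_slice: list[int] = []
--
--     for i, slice in enumerate(time_slices):
--         current_slice.extend(slice)
--         if (i + 1) % aggregate_slices == 0:
--             aggregated.append(current_slice)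
--             current_slice = []
--
--     if current_slice:
--         aggregated.append(current_slice)
--
--     return aggregated
-- ===== SOURCE B (Python) =====
-- def _aggregate_time_slices(
--     time_slices: list[list[int]],
--     aggregate_slices: int
-- ) -> list[list[int]]:
--     """Aggregate time slices by flattening consecutive windows of aggregate_slices slices."""
--     if aggregate_slices <= 1:
--         return time_slices
--
--     full = len(time_slices) // aggregate_slices
--     aggregated = [
--         [x for s in time_slices[i * aggregate_slices:(i + 1) * aggregate_slices] for x in s]
--         for i in range(full)
--     ]
--     tail = [x for s in time_slices[full * aggregate_slices:] for x in s]
--     if tail: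
--         aggregated.append(tail)
--     return aggregated
-- ===== Notes on version B (the rewrite author's own statement) =====
-- stated objective: simpler
-- what changed: Replaces the running modulo counter, mutable accumulator and post-loop flush with index-stepped windowing: a comprehension flattens each of the len//k full windows, then the flattened leftover slices are appended if there are any elements.
import Mathlib
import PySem

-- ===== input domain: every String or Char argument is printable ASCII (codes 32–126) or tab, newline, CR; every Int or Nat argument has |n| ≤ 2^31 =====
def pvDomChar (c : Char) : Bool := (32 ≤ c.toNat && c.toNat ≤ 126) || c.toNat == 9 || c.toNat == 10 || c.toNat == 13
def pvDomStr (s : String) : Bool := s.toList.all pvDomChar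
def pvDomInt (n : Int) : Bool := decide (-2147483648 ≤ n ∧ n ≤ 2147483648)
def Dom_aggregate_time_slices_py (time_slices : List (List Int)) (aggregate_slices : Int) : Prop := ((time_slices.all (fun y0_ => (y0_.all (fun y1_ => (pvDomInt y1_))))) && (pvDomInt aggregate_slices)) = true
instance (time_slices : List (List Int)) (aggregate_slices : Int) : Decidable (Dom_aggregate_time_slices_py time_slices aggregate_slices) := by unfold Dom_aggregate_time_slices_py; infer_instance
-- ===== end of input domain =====

-- B replaces A's running modulo counter and post-loop flush by index-stepped windowing (objective: simpler).

-- ===== PORT A =====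
-- fold state: (aggregated, current_slice); counter condition (i+1) % aggregate_slices == 0
def aggregate_time_slices_py (time_slices : List (List Int)) (aggregate_slices : Int) : List (List Int) :=
  if aggregate_slices ≤ 1 then time_slices
  else
    let st := (PySem.List.enumerate time_slices 0).foldl
      (fun (s : List (List Int) × List Int) p =>
        let cur := s.2 ++ p.2
        if PySem.Int.mod (p.1 + 1) aggregate_slices == 0 then (s.1 ++ [cur], ([] : List Int))
        else (s.1, cur)) ([], [])
    if st.2 ≠ [] then st.1 ++ [st.2] else st.1

-- ===== PORT B =====
-- ts[a:b] windows ported as (ts.drop a).take (b-a); range(full) as List.range;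
-- the two comprehensions become map/flatten, the final conditional append stays an if
def aggregate_time_slices_py_alt (time_slices : List (List Int)) (aggregate_slices : Int) : List (List Int) :=
  if aggregate_slices ≤ 1 then time_slices
  else
    let kn := aggregate_slices.toNat
    let full := time_slices.length / kn
    let aggregated := (List.range full).map
      (fun i => ((time_slices.drop (i * kn)).take kn).flatten)
    let tail := (time_slices.drop (full * kn)).flatten
    if tail ≠ [] then aggregated ++ [tail] else aggregated

-- ===== PRECONDITION & SPEC =====
def Spec_aggregate_time_slices_py (time_slices : List (List Int)) (aggregate_slices : Int) (out : List (List Int)) : Prop := out = aggregate_time_slices_py_alt time_slices aggregate_slices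
instance (time_slices : List (List Int)) (aggregate_slices : Int) (out : List (List Int)) : Decidable (Spec_aggregate_time_slices_py time_slices aggregate_slices out) := by unfold Spec_aggregate_time_slices_py; infer_instance

-- ===== CLAIM (what is proved, stated in full; the proofs are below) =====
def Claim_equal_aggregate_time_slices_py : Prop := ∀ (time_slices : List (List Int)) (aggregate_slices : Int), Dom_aggregate_time_slices_py time_slices aggregate_slices → Spec_aggregate_time_slices_py time_slices aggregate_slices (aggregate_time_slices_py time_slices aggregate_slices)

-- ===== LEMMAS AND PROOFS =====

-- A's guarded chunking: the value of A's fold, used only in the proofs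
def pvChunksA (k : Nat) : List (List Int) → List (List Int)
  | [] => []
  | t :: ts' =>
    let window := (t :: ts').take k
    let flat := window.flatten
    let rest := pvChunksA k (ts'.drop (k - 1))
    if window.length == k || flat ≠ [] then flat :: rest else rest
termination_by ts => ts.length
decreasing_by simp

theorem pv_not_dvd (k s j : Int) (hdvd : k ∣ s) (h1 : 0 < j) (h2 : j < k) : ¬ k ∣ (s + j) := by
  intro hd
  have hj : k ∣ j := by
    have := dvd_sub hd hdvd
    simpa using this
  exact absurd (Int.le_of_dvd h1 hj) (by omega)

-- A's fold step, abbreviated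
def pvStep (k : Int) (s : List (List Int) × List Int) (p : Int × List Int) : List (List Int) × List Int :=
  let cur := s.2 ++ p.2
  if PySem.Int.mod (p.1 + 1) k == 0 then (s.1 ++ [cur], ([] : List Int)) else (s.1, cur)

-- a run in which the counter never fires only extends current_slice
theorem pv_nofire (k : Int) : ∀ (xs : List (List Int)) (s : Int) (agg : List (List Int)) (cur : List Int),
    (∀ j : Nat, j < xs.length → ¬ (k ∣ (s + j + 1))) →
    (PySem.List.enumerate xs s).foldl (pvStep k) (agg, cur) = (agg, cur ++ xs.flatten) := by
  intro xs
  induction xs with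
  | nil => intro s agg cur _; simp [PySem.List.enumerate_nil]
  | cons x xs ih =>
    intro s agg cur h
    have h0 : ¬ (k ∣ (s + 1)) := by have := h 0 (by simp); simpa using this
    rw [PySem.List.enumerate_cons, List.foldl_cons]
    have hc : (PySem.Int.mod (s + 1) k == 0) = false := by
      simp [PySem.Int.mod_eq_zero_iff_dvd, h0]
    simp only [pvStep, hc, Bool.false_eq_true, if_false]
    rw [ih (s + 1) agg (cur ++ x) (by
      intro j hj hd
      refine h (j + 1) (by simpa using hj) ?_
      have e : s + ((j + 1 : Nat) : Int) + 1 = s + 1 + (j : Int) + 1 := by push_cast; ring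
      rw [e]; exact hd)]
    simp

-- a full chunk (length k.toNat, starting at a multiple of k) flushes exactly once
theorem pv_chunk (k : Int) (hk : 2 ≤ k) (xs : List (List Int)) (s : Int) (agg : List (List Int)) (cur : List Int)
    (hlen : xs.length = k.toNat) (hs : 0 ≤ s) (hdvd : k ∣ s) :
    (PySem.List.enumerate xs s).foldl (pvStep k) (agg, cur) = (agg ++ [cur ++ xs.flatten], []) := by
  have hne : xs ≠ [] := by intro h; subst h; simp at hlen; omega
  obtain ⟨ys, z, h'⟩ := (List.eq_nil_or_concat xs).resolve_left hne
  rw [List.concat_eq_append] at h'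
  subst h'
  have hys : ys.length = k.toNat - 1 := by simp at hlen; omega
  rw [PySem.List.enumerate_append, List.foldl_append]
  rw [pv_nofire k ys s agg cur (by
    intro j hj
    rw [show s + (j : Int) + 1 = s + ((j : Int) + 1) from by ring]
    refine pv_not_dvd k s ((j : Int) + 1) hdvd (by omega) ?_
    rw [hys] at hj
    omega)]
  rw [PySem.List.enumerate_cons, PySem.List.enumerate_nil]
  have hfire : (PySem.Int.mod (s + ↑ys.length + 1) k == 0) = true := by
    rw [beq_iff_eq, PySem.Int.mod_eq_zero_iff_dvd]
    obtain ⟨q, hq⟩ := hdvd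
    refine ⟨q + 1, ?_⟩
    rw [hys]
    have e : ((k.toNat - 1 : Nat) : Int) = k - 1 := by omega
    rw [e, hq]; ring
  simp only [List.foldl_cons, List.foldl_nil, pvStep, hfire]
  simp

-- main invariant: fold-then-flush starting at a multiple of k equals A's guarded chunking
theorem pv_main (k : Int) (hk : 2 ≤ k) : ∀ (n : Nat) (ts : List (List Int)) (s : Int) (agg : List (List Int)),
    ts.length = n → 0 ≤ s → k ∣ s →
    (let st := (PySem.List.enumerate ts s).foldl (pvStep k) (agg, []);
     if st.2 ≠ [] then st.1 ++ [st.2] else st.1)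
    = agg ++ pvChunksA k.toNat ts := by
  intro n
  induction n using Nat.strong_induction_on with
  | _ n ih =>
    intro ts s agg hlen hs hdvd
    match ts with
    | [] => simp [PySem.List.enumerate_nil, pvChunksA]
    | t :: ts' =>
      by_cases hge : k.toNat ≤ (t :: ts').length
      · -- full chunk at the front
        have hwlen : ((t :: ts').take k.toNat).length = k.toNat := by
          rw [List.length_take]; omega
        rw [show PySem.List.enumerate (t :: ts') s = PySem.List.enumerate ((t :: ts').take k.toNat ++ (t :: ts').drop k.toNat) s from by rw [List.take_append_drop]]
        rw [PySem.List.enumerate_append, List.foldl_append]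
        rw [pv_chunk k hk _ s agg [] hwlen hs hdvd]
        have hlen2 : ((t :: ts').drop k.toNat).length = n - k.toNat := by simp [← hlen]
        have hcast : (((t :: ts').take k.toNat).length : Int) = k := by rw [hwlen]; omega
        have hrec := ih (n - k.toNat) (by simp at hlen; omega) ((t :: ts').drop k.toNat) (s + ((t :: ts').take k.toNat).length) (agg ++ [[] ++ ((t :: ts').take k.toNat).flatten]) hlen2
          (add_nonneg hs (Int.natCast_nonneg _))
          (by obtain ⟨q, hq⟩ := hdvd; refine ⟨q + 1, ?_⟩; rw [hcast, hq]; ring)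
        simp only at hrec ⊢
        rw [hrec]
        rw [pvChunksA]
        have hwl : (((t :: ts').take k.toNat).length == k.toNat) = true := by
          simp [hwlen]
        simp only [hwl, Bool.true_or, if_pos rfl]
        have hdrop : ts'.drop (k.toNat - 1) = (t :: ts').drop k.toNat := by
          have hk1 : k.toNat = (k.toNat - 1) + 1 := by omega
          rw [hk1]; simp
        rw [hdrop]
        simp
      · -- trailing partial window
        push_neg at hge
        have hlt : ts'.length + 1 < k.toNat := by simpa using hge
        rw [pv_nofire k (t :: ts') s agg [] (by
          intro j hj
          rw [show s + (j : Int) + 1 = s + ((j : Int) + 1) from by ring]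
          refine pv_not_dvd k s ((j : Int) + 1) hdvd (by omega) ?_
          omega)]
        rw [pvChunksA]
        have htake : (t :: ts').take k.toNat = t :: ts' := List.take_of_length_le (by omega)
        have hwl : (((t :: ts').take k.toNat).length == k.toNat) = false := by
          rw [htake]; simp; omega
        have hdrop : ts'.drop (k.toNat - 1) = [] := List.drop_eq_nil_of_le (by omega)
        simp only [hwl, Bool.false_or, htake, hdrop, pvChunksA]
        by_cases hflat : (t :: ts').flatten = []
        · simp [hflat]; omega
        · by_cases ht : t = []
          · have hfl : ts'.flatten ≠ [] := by simpa [ht] using hflat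
            have hex : ∃ x ∈ ts', ¬x = [] := by
              by_contra hc
              simp only [not_exists, not_and, not_not] at hc
              exact hfl (List.flatten_eq_nil_iff.mpr (by intro l hl; exact hc l hl))
            simp [ht, hex]
          · simp [ht]

-- A's guarded chunking in indexed-window form (B's shape)
theorem pv_chunksA_eq (k : Nat) (hk : 1 ≤ k) : ∀ (n : Nat) (ts : List (List Int)), ts.length = n →
    pvChunksA k ts =
      (List.range (ts.length / k)).map (fun i => ((ts.drop (i * k)).take k).flatten) ++
        (if (ts.drop (ts.length / k * k)).flatten ≠ [] then [(ts.drop (ts.length / k * k)).flatten] else []) := by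
  intro n
  induction n using Nat.strong_induction_on with
  | _ n ih =>
    intro ts hlen
    match ts with
    | [] => simp [pvChunksA]
    | t :: ts' =>
      by_cases hge : k ≤ (t :: ts').length
      · have hge2 : k ≤ ts'.length + 1 := by simpa using hge
        have hwl : (((t :: ts').take k).length == k) = true := by
          simp [List.length_take]; omega
        have hdrop : ts'.drop (k - 1) = (t :: ts').drop k := by
          have hk1 : k = (k - 1) + 1 := by omega
          rw [hk1]; simp
        have hlen' : ((t :: ts').drop k).length = (t :: ts').length - k := by simp
        have hdiv : (t :: ts').length / k = ((t :: ts').length - k) / k + 1 :=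
          Nat.div_eq_sub_div (by omega) hge
        have hn : ts'.length + 1 = n := by simpa using hlen
        have hrec := ih (n - k) (by omega) ((t :: ts').drop k) (by simp [← hlen])
        rw [pvChunksA]
        simp only [hwl, Bool.true_or, if_true]
        rw [hdrop, hrec, hlen', hdiv, List.range_succ_eq_map]
        simp only [List.map_cons, List.map_map]
        rw [List.cons_append]
        congr 1
        · simp
        congr 1
        · refine List.map_congr_left ?_
          intro i _
          simp only [Function.comp_apply]
          rw [List.drop_drop]
          congr 3
          simp only [Nat.succ_mul, Nat.mul_succ]
          omega
        · rw [List.drop_drop]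
          have hmul : (((t :: ts').length - k) / k + 1) * k = k + ((t :: ts').length - k) / k * k := by ring
          rw [hmul]
      · push_neg at hge
        have hge' : ts'.length + 1 < k := by simpa using hge
        have hdiv : (t :: ts').length / k = 0 := Nat.div_eq_of_lt hge
        have htake : (t :: ts').take k = t :: ts' := List.take_of_length_le (by omega)
        have hwl : (((t :: ts').take k).length == k) = false := by
          rw [htake]; simp; omega
        have hdropnil : ts'.drop (k - 1) = [] := List.drop_eq_nil_of_le (by omega)
        rw [pvChunksA]
        simp only [hwl, Bool.false_or, htake, hdropnil, pvChunksA, hdiv]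
        simp only [Nat.zero_mul, List.range_zero, List.map_nil, List.drop_zero, List.nil_append]
        have e1 : (ts'.length + 1 = k ∨ ¬t = [] ∨ ∃ x ∈ ts', ¬x = []) ↔ (t = [] → ∃ x ∈ ts', ¬x = []) := by
          constructor
          · rintro (h1 | h2 | h3) ht
            · omega
            · exact absurd ht h2
            · exact h3
          · intro hI
            by_cases ht : t = []
            · exact Or.inr (Or.inr (hI ht))
            · exact Or.inr (Or.inl ht)
        by_cases hfl : (t :: ts').flatten = []
        · simp [hfl]
          omega
        · simp [hfl]
          exact if_congr e1 rfl rfl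

-- ===== VERDICT (by name: the statement is the Claim_ definition above) =====
theorem aggregate_time_slices_py_spec : Claim_equal_aggregate_time_slices_py := by
  intro ts k _
  unfold Spec_aggregate_time_slices_py aggregate_time_slices_py aggregate_time_slices_py_alt
  by_cases h : k ≤ 1
  · simp [h]
  · have hk : 2 ≤ k := by omega
    have hA := pv_main k hk ts.length ts 0 [] rfl le_rfl ⟨0, by ring⟩
    rw [if_neg h, if_neg h]
    refine hA.trans ?_
    rw [pv_chunksA_eq k.toNat (by omega) ts.length ts rfl]
    simp only [List.nil_append]
    split_ifs <;> simp
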